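-- pv_equiv track=rewrite | github.com/Percep3/Imitator-waimlap | scripts/benchchrF.py | _prepare_reference_streams
-- ===== SOURCE A (Python) =====
-- from typing import Dict, Iterable, List, Sequence, Tuple
--
-- def _prepare_reference_streams(references: Sequence[Sequence[str]]) -> List[List[str]]:
--     """Asegura que todas las muestras tengan el mismo número de referencias."""
--     if not references:
--         raise ValueError("No references available to compute chrF++.")
--
--     max_refs = max(len(ref_list) for ref_list in references)
--     ref_streams: List[List[str]] = [[] for _ in range(max_refs)]
--
--     for ref_list in references:
--         if not ref_list:
--             raise ValueError("Found a sample with empty reference list.")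
--         fallback = ref_list[0]
--         for idx in range(max_refs):
--             variant = ref_list[idx] if idx < len(ref_list) else fallback
--             ref_streams[idx].append(variant.strip())
--
--     return ref_streams
-- ===== SOURCE B (Python) =====
-- def _prepare_reference_streams(references):
--     if not references:
--         raise ValueError("No references available to compute chrF++.")
--     for ref_list in references:
--         if not ref_list:
--             raise ValueError("Found a sample with empty reference list.")
--
--     # Head/tail streaming: no max length, no index arithmetic.  Each cursor
--     # holds (remaining suffix, fallback = first element); while any suffix is
--     # nonempty, emit one column of stripped heads (fallback when exhausted)
--     # and advance every cursor by one.  The loop stops after exactly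
--     # max(len) steps, so this produces the same streams.
--     cursors = [(ref_list, ref_list[0]) for ref_list in references]
--     streams = []
--     while any(rest for rest, _ in cursors):
--         streams.append([(rest[0] if rest else fb).strip() for rest, fb in cursors])
--         cursors = [(rest[1:], fb) for rest, fb in cursors]
--     return streams
-- ===== Notes on version B (the rewrite author's own statement) =====
-- stated objective: alternative
-- what changed: B never computes max_refs and never indexes: it keeps a (remaining-suffix, fallback) cursor per sample and streams columns by repeatedly taking stripped heads and tails until every suffix is exhausted, versus A's pre-allocated streams filled by a nested index loop over range(max_refs).
import Mathlib
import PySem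

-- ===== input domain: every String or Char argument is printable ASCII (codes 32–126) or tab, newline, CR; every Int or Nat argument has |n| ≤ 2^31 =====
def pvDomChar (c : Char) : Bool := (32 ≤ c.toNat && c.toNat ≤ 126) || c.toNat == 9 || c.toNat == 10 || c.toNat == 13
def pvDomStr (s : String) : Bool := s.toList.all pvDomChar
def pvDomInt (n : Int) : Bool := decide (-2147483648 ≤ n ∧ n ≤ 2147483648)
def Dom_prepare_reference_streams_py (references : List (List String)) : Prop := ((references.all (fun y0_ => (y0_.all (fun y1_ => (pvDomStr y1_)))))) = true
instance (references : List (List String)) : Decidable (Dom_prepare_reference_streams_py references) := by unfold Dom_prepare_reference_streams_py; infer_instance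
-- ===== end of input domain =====

-- B streams columns with per-sample (suffix, fallback) cursors instead of A's
-- range(max_refs) index loop into pre-allocated streams; objective: alternative (same cost).

-- ===== PORT A =====
-- literal port: max over lengths, pre-allocated empty streams, nested loop appending the
-- stripped variant to stream idx (the in-place list append becomes List.set at idx).
def prepare_reference_streams_py (references : List (List String)) : List (List String) :=
  let max_refs : Nat := (PySem.List.max? (references.map (fun rl => rl.length)) (fun x => x)).getD 0
  let init : List (List String) := (List.range max_refs).map (fun _ => ([] : List String))
  references.foldl
    (fun streams rl =>
      let fallback := rl.headD ""          -- rl[0]; Pre_ guarantees rl ≠ []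
      (List.range max_refs).foldl
        (fun s idx =>
          let variant := if idx < rl.length then rl.getD idx "" else fallback
          s.set idx ((s.getD idx []) ++ [PySem.Str.strip variant]))
        streams)
    init

-- ===== PORT B =====
-- the cursor-advance step strictly shrinks the total remaining length (termination of the while loop)
lemma pvSumTail_lt (cursors : List (List String × String))
    (h : cursors.any (fun c => !c.1.isEmpty) = true) :
    (cursors.map (fun c => c.1.length - 1)).sum < (cursors.map (fun c => c.1.length)).sum := by
  induction cursors with
  | nil => simp at h
  | cons d ds ih =>
    simp only [List.any_cons, Bool.or_eq_true] at h
    simp only [List.map_cons, List.sum_cons]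
    rcases h with h | h
    · have hd : d.1 ≠ [] := by simpa [List.isEmpty_iff] using h
      have h0 : 0 < d.1.length := List.length_pos_of_ne_nil hd
      have hle : (ds.map (fun c => c.1.length - 1)).sum ≤ (ds.map (fun c => c.1.length)).sum := by
        apply List.sum_le_sum
        intro x _
        omega
      omega
    · have := ih h
      omega

-- the while loop of Source B: while any suffix is nonempty, emit the column of stripped
-- heads (fallback for exhausted cursors) and advance every cursor to its tail
def pvWhileColumns (cursors : List (List String × String)) : List (List String) :=
  if h : cursors.any (fun c => !c.1.isEmpty) then
    (cursors.map (fun c => PySem.Str.strip (c.1.headD c.2))) ::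
      pvWhileColumns (cursors.map (fun c => (c.1.tail, c.2)))
  else []
termination_by (cursors.map (fun c => c.1.length)).sum
decreasing_by
  have e : (List.map (fun (x : Subtype (Membership.mem cursors)) => (↑x : List String × String).1.length - 1) cursors.attach)
      = List.map (fun (c : List String × String) => c.1.length - 1) cursors := by
    rw [show (fun (x : Subtype (Membership.mem cursors)) => (↑x : List String × String).1.length - 1)
          = (fun (c : List String × String) => c.1.length - 1) ∘ Subtype.val from rfl,
        ← List.map_map, List.attach_map_subtype_val]
  simpa [Function.comp_def, e] using pvSumTail_lt cursors h
def prepare_reference_streams_py_alt (references : List (List String)) : List (List String) :=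
  pvWhileColumns (references.map (fun rl => (rl, rl.headD "")))

-- ===== PRECONDITION & SPEC =====
-- Pre_ excludes exactly the inputs on which A raises ValueError: an empty references list,
-- or a sample whose reference list is empty.
def Pre_prepare_reference_streams_py (references : List (List String)) : Prop :=
  references ≠ [] ∧ ∀ rl ∈ references, rl ≠ []
instance (references : List (List String)) : Decidable (Pre_prepare_reference_streams_py references) := by unfold Pre_prepare_reference_streams_py; infer_instance

def pvWitness_prepare_reference_streams_py : List (List String) := [[" a ", "b"], ["c"]]

def Spec_prepare_reference_streams_py (references : List (List String)) (out : List (List String)) : Prop := out = prepare_reference_streams_py_alt references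
instance (references : List (List String)) (out : List (List String)) : Decidable (Spec_prepare_reference_streams_py references out) := by unfold Spec_prepare_reference_streams_py; infer_instance

-- ===== CLAIM (what is proved, stated in full; the proofs are below) =====
def Claim_equal_prepare_reference_streams_py : Prop := ∀ (references : List (List String)), Dom_prepare_reference_streams_py references → Pre_prepare_reference_streams_py references → Spec_prepare_reference_streams_py references (prepare_reference_streams_py references)

-- ===== LEMMAS AND PROOFS =====

-- the stripped padded cell both programs compute for sample rl at column i
def pvCell (rl : List String) (i : Nat) : String :=
  PySem.Str.strip (if i < rl.length then rl.getD i "" else rl.headD "")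

-- A's inner loop preserves the length of the streams list
lemma pvInner_length (f : Nat → String) (k : Nat) (s : List (List String)) :
    ((List.range k).foldl (fun s idx => s.set idx ((s.getD idx []) ++ [f idx])) s).length
      = s.length := by
  induction k generalizing s with
  | zero => simp
  | succ k ih =>
    rw [List.range_succ, List.foldl_append]
    simp only [List.foldl_cons, List.foldl_nil, List.length_set]
    exact ih s

-- pointwise effect of A's inner loop
lemma pvInner_getD (f : Nat → String) (k : Nat) (s : List (List String)) (i : Nat) :
    ((List.range k).foldl (fun s idx => s.set idx ((s.getD idx []) ++ [f idx])) s).getD i []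
      = if i < k ∧ i < s.length then s.getD i [] ++ [f i] else s.getD i [] := by
  induction k generalizing i with
  | zero => simp
  | succ k ih =>
    rw [List.range_succ, List.foldl_append]
    simp only [List.foldl_cons, List.foldl_nil]
    rcases Nat.lt_trichotomy i k with hik | hik | hik
    · have hne2 : k ≠ i := by omega
      rw [List.getD_eq_getElem?_getD]
      simp only [List.getElem?_set_ne hne2]
      rw [← List.getD_eq_getElem?_getD, ih]
      have : i < k + 1 := by omega
      simp [hik, this]
    · subst hik
      by_cases hlen : i < s.length
      · rw [List.getD_eq_getElem?_getD,
            List.getElem?_set_eq_of_lt _ (by rw [pvInner_length]; exact hlen)]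
        rw [Option.getD_some, ih]
        simp [hlen]
      · rw [List.set_eq_of_length_le (by rw [pvInner_length]; omega), ih]
        simp [hlen]
    · have hne2 : k ≠ i := by omega
      rw [List.getD_eq_getElem?_getD, List.getElem?_set_ne hne2]
      rw [← List.getD_eq_getElem?_getD, ih]
      have h1 : ¬ i < k := by omega
      have h2 : ¬ i < k + 1 := by omega
      simp [h1, h2]

-- A's inner loop turns a range-map state into a range-map state with one cell appended per column
lemma pvInner_map (f : Nat → String) (m : Nat) (g : Nat → List String) :
    (List.range m).foldl (fun s idx => s.set idx ((s.getD idx []) ++ [f idx]))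
        ((List.range m).map g)
      = (List.range m).map (fun i => g i ++ [f i]) := by
  apply List.ext_getElem
  · rw [pvInner_length]; simp
  · intro i h1 h2
    have him : i < m := by simpa using h2
    have hL : i < ((List.range m).map g).length := by simpa using him
    rw [← List.getD_eq_getElem _ [], ← List.getD_eq_getElem _ []]
    rw [pvInner_getD]
    simp [him]

-- A's outer loop accumulates, per column, the list of cells of the processed samples
lemma pvOuter (m : Nat) (refs : List (List String)) :
    ∀ (g : Nat → List String),
      refs.foldl
        (fun streams rl =>
          (List.range m).foldl
            (fun s idx => s.set idx ((s.getD idx []) ++ [pvCell rl idx])) streams)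
        ((List.range m).map g)
      = (List.range m).map (fun i => g i ++ refs.map (fun rl => pvCell rl i)) := by
  induction refs with
  | nil => intro g; simp
  | cons rl rest ih =>
    intro g
    rw [List.foldl_cons, pvInner_map, ih]
    apply List.map_congr_left
    intro i _
    simp

-- maximum suffix length of a cursor list
def pvMaxLen (cursors : List (List String × String)) : Nat :=
  (cursors.map (fun c => c.1.length)).foldr max 0

lemma pvMaxLen_tail (cursors : List (List String × String)) :
    pvMaxLen (cursors.map (fun c => (c.1.tail, c.2))) = pvMaxLen cursors - 1 := by
  induction cursors with
  | nil => simp [pvMaxLen]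
  | cons c cs ih =>
    simp only [pvMaxLen, List.map_cons, List.foldr_cons, List.length_tail] at *
    omega

lemma pvLen_le_maxLen (c : List String × String) (cursors : List (List String × String))
    (hc : c ∈ cursors) : c.1.length ≤ pvMaxLen cursors := by
  induction cursors with
  | nil => cases hc
  | cons d ds ih =>
    rcases List.mem_cons.mp hc with h | h
    · subst h; simp only [pvMaxLen, List.map_cons, List.foldr_cons]; omega
    · have := ih h
      simp only [pvMaxLen, List.map_cons, List.foldr_cons] at this ⊢
      omega

lemma pvMaxLen_pos_any (cursors : List (List String × String))
    (h : 0 < pvMaxLen cursors) : cursors.any (fun c => !c.1.isEmpty) = true := by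
  induction cursors with
  | nil => simp [pvMaxLen] at h
  | cons c cs ih =>
    simp only [pvMaxLen, List.map_cons, List.foldr_cons] at h
    by_cases hc : c.1 = []
    · have : 0 < pvMaxLen cs := by simp only [pvMaxLen]; simp [hc] at h; omega
      simpa using Or.inr (by simpa using ih this)
    · simp [List.any_cons, hc]

-- the while loop produces exactly the pvMaxLen-column transpose with fallbacks
lemma pvWhileColumns_eq (M : Nat) : ∀ (cursors : List (List String × String)),
    pvMaxLen cursors = M →
    pvWhileColumns cursors
      = (List.range M).map (fun i =>
          cursors.map (fun c =>
            PySem.Str.strip (if i < c.1.length then c.1.getD i "" else c.2))) := by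
  induction M with
  | zero =>
    intro cursors hM
    rw [pvWhileColumns]
    have hno : ¬ cursors.any (fun c => !c.1.isEmpty) = true := by
      intro hany
      simp only [List.any_eq_true] at hany
      obtain ⟨c, hc, hne⟩ := hany
      have hcne : c.1 ≠ [] := by simpa [List.isEmpty_iff] using hne
      have hlt : 0 < c.1.length := List.length_pos_of_ne_nil hcne
      have hle := pvLen_le_maxLen c cursors hc
      omega
    simp [hno]
  | succ m ih =>
    intro cursors hM
    have hany : cursors.any (fun c => !c.1.isEmpty) = true :=
      pvMaxLen_pos_any cursors (by omega)
    rw [pvWhileColumns, dif_pos hany]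
    have htail : pvMaxLen (cursors.map (fun c => (c.1.tail, c.2))) = m := by
      rw [pvMaxLen_tail, hM]
      omega
    rw [ih _ htail, List.range_succ_eq_map, List.map_cons, List.map_map]
    congr 1
    · apply List.map_congr_left
      intro c _
      cases c.1 with
      | nil => simp
      | cons a t => simp
    · apply List.map_congr_left
      intro i _
      simp only [Function.comp_apply]
      rw [List.map_map]
      apply List.map_congr_left
      intro c _
      simp only [Function.comp_apply, List.length_tail]
      cases c.1 with
      | nil => simp
      | cons a t =>
        simp only [List.tail_cons, List.length_cons]
        by_cases hi : i < t.length
        · have h2 : i + 1 < t.length + 1 := by omega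
          simp [hi, h2]
        · have h2 : ¬ i + 1 < t.length + 1 := by omega
          simp [hi, h2]

-- on a nonempty list, Python's max equals the foldr-max with base 0
lemma pvFoldlMax (t : List Nat) : ∀ x : Nat, t.foldl max x = max x (t.foldr max 0) := by
  induction t with
  | nil => intro x; simp
  | cons a t ih =>
    intro x
    simp only [List.foldl_cons, List.foldr_cons, ih]
    omega

lemma pvMaxRefs_eq (references : List (List String)) (hne : references ≠ []) :
    (PySem.List.max? (references.map (fun rl => rl.length)) (fun x => x)).getD 0
      = pvMaxLen (references.map (fun rl => (rl, rl.headD ""))) := by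
  cases references with
  | nil => exact absurd rfl hne
  | cons rl rest =>
    rw [List.map_cons, PySem.List.max?_id_cons, Option.getD_some]
    simp only [pvMaxLen, List.map_cons, List.map_map, pvFoldlMax]
    congr 1

-- ===== VERDICT (by name: the statement is the Claim_ definition above) =====
theorem prepare_reference_streams_py_spec : Claim_equal_prepare_reference_streams_py := by
  intro references _ hpre
  obtain ⟨hne, _⟩ := hpre
  show prepare_reference_streams_py references = prepare_reference_streams_py_alt references
  unfold prepare_reference_streams_py prepare_reference_streams_py_alt
  set m : Nat := (PySem.List.max? (references.map (fun rl => rl.length)) (fun x => x)).getD 0 with hm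
  simp only []
  have hA :
      references.foldl
        (fun streams rl =>
          (List.range m).foldl
            (fun s idx =>
              s.set idx ((s.getD idx []) ++
                [PySem.Str.strip (if idx < rl.length then rl.getD idx "" else rl.headD "")]))
            streams)
        ((List.range m).map (fun _ => ([] : List String)))
      = (List.range m).map (fun i => references.map (fun rl => pvCell rl i)) := by
    have := pvOuter m references (fun _ => ([] : List String))
    simpa [pvCell] using this
  rw [hA]
  have hMeq : pvMaxLen (references.map (fun rl => (rl, rl.headD ""))) = m :=
    (pvMaxRefs_eq references hne).symm
  rw [pvWhileColumns_eq m _ hMeq]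
  apply List.map_congr_left
  intro i _
  rw [List.map_map]
  apply List.map_congr_left
  intro rl _
  simp [pvCell]
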